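-- pv_equiv track=rewrite | github.com/Nicholas282787728/termolator-d | term_utilities.py | replace_less_than_with_positions
-- ===== SOURCE A (Python) =====
-- from typing import List, Dict, Tuple, Pattern, Match, Optional
--
-- def replace_less_than_with_positions(string: str, offset: int) -> Tuple[str, List[List[int]]]:
--     out_string = ''
--     num = 0
--     less_thans: List[List[int]] = []
--     length = len(string)
--
--     for char in string:
--         if char == '<':
--             start = num + offset
--             if (num < (length - 1)) and (string[num + 1] == ' '):
--                 plus = 2
--             else:
--                 plus = 1
--             less_thans.append([num + offset, num + offset + plus])
--             out_string = out_string + ' '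
--         else:
--             out_string = out_string + char
--         num = num + 1
--     return (out_string, less_thans)
-- ===== SOURCE B (Python) =====
-- def replace_less_than_with_positions(string, offset):
--     out_string = string.replace('<', ' ')
--     less_thans = []
--     length = len(string)
--     i = string.find('<')
--     while i != -1:
--         if i < length - 1 and string[i + 1] == ' ':
--             plus = 2
--         else:
--             plus = 1
--         less_thans.append([i + offset, i + offset + plus])
--         i = string.find('<', i + 1)
--     return (out_string, less_thans)
-- ===== Notes on version B (the rewrite author's own statement) =====
-- stated objective: faster
-- what changed: A's single char-by-char loop that builds the output string and the position list together is replaced by one whole-string str.replace for the output plus a separate scan that hops directly between '<' occurrences with str.find(start).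
import Mathlib
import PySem

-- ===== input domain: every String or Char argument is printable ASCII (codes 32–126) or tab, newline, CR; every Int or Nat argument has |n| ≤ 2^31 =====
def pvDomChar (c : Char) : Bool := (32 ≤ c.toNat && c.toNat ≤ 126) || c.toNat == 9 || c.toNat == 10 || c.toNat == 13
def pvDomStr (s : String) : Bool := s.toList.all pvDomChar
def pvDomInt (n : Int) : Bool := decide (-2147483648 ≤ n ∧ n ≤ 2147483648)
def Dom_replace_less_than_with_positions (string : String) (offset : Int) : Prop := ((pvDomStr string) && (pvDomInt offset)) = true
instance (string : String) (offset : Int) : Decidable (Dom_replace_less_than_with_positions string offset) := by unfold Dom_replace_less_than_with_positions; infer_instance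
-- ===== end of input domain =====

-- B replaces A's char-by-char accumulation with one whole-string replace plus a find-hopping
-- scan between '<' occurrences (measurably faster in Python; same return value).

-- ===== PORT A =====
-- literal port of A's single loop: out_string, num and less_thans carried as accumulators;
-- the string is re-indexed at num+1 via pyGet? exactly as A does string[num + 1]
def pvALoop (s : List Char) (offset : Int) : List Char → Nat → List Char → List (List Int) → List Char × List (List Int)
  | [], _, out, acc => (out, acc)
  | c :: r, num, out, acc =>
    if c = '<' then
      let plus : Int := if (num : Int) < (s.length : Int) - 1 ∧ PySem.List.pyGet? s ((num : Int) + 1) = some ' ' then 2 else 1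
      pvALoop s offset r (num + 1) (out ++ [' ']) (acc ++ [[(num : Int) + offset, (num : Int) + offset + plus]])
    else
      pvALoop s offset r (num + 1) (out ++ [c]) acc

def replace_less_than_with_positions (string : String) (offset : Int) : String × List (List Int) :=
  let res := pvALoop string.toList offset string.toList 0 [] []
  (String.ofList res.1, res.2)

-- ===== PORT B =====
-- port of Source B's while loop: hop between occurrences with string.find('<', i) (PySem.Chars.findFrom);
-- the `hi` argument and the two `have`s only establish totality of the hop
def pvBHop (s : List Char) (offset : Int) (i : Nat) (hi : i ≤ s.length) : List (List Int) :=
  if h : PySem.Chars.findFrom s ['<'] (i : Int) none = -1 then []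
  else
    have hspec := PySem.Chars.findFrom_natCast_spec s ['<'] i hi h
    have hij : i ≤ (PySem.Chars.findFrom s ['<'] (i : Int) none).toNat := by
      have := hspec.1; omega
    have hjlt : (PySem.Chars.findFrom s ['<'] (i : Int) none).toNat < s.length := by
      have hpre := hspec.2.1
      by_contra hle
      rw [List.drop_eq_nil_of_le (by omega)] at hpre
      exact absurd (List.prefix_nil.mp hpre) (by simp)
    let j : Nat := (PySem.Chars.findFrom s ['<'] (i : Int) none).toNat
    let plus : Int := if (j : Int) < (s.length : Int) - 1 ∧ PySem.List.pyGet? s ((j : Int) + 1) = some ' ' then 2 else 1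
    [(j : Int) + offset, (j : Int) + offset + plus] :: pvBHop s offset (j + 1) hjlt
termination_by s.length - i
decreasing_by omega

def replace_less_than_with_positions_alt (string : String) (offset : Int) : String × List (List Int) :=
  (PySem.Str.replace string "<" " ", pvBHop string.toList offset 0 (Nat.zero_le _))

-- ===== PRECONDITION & SPEC =====
def Spec_replace_less_than_with_positions (string : String) (offset : Int) (out : String × List (List Int)) : Prop := out = replace_less_than_with_positions_alt string offset
instance (string : String) (offset : Int) (out : String × List (List Int)) : Decidable (Spec_replace_less_than_with_positions string offset out) := by unfold Spec_replace_less_than_with_positions; infer_instance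

-- ===== CLAIM (what is proved, stated in full; the proofs are below) =====
def Claim_equal_replace_less_than_with_positions : Prop := ∀ (string : String) (offset : Int), Dom_replace_less_than_with_positions string offset → Spec_replace_less_than_with_positions string offset (replace_less_than_with_positions string offset)

-- ===== LEMMAS AND PROOFS =====

-- canonical substitution and position list both ports are reduced to
def pvSub (c : Char) : Char := if c = '<' then ' ' else c

def pvEntry (s : List Char) (offset : Int) (num : Nat) : List Int :=
  [(num : Int) + offset, (num : Int) + offset + (if (num : Int) < (s.length : Int) - 1 ∧ PySem.List.pyGet? s ((num : Int) + 1) = some ' ' then 2 else 1)]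

def pvCanon (s : List Char) (offset : Int) : List Char → Nat → List (List Int)
  | [], _ => []
  | c :: r, num => if c = '<' then pvEntry s offset num :: pvCanon s offset r (num + 1) else pvCanon s offset r (num + 1)

theorem pvALoop_eq (s : List Char) (offset : Int) :
    ∀ (rest : List Char) (num : Nat) (out : List Char) (acc : List (List Int)),
      pvALoop s offset rest num out acc = (out ++ rest.map pvSub, acc ++ pvCanon s offset rest num) := by
  intro rest
  induction rest with
  | nil => intro num out acc; simp [pvALoop, pvCanon]
  | cons c r ih =>
    intro num out acc
    by_cases hc : c = '<'
    · subst hc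
      simp [pvALoop, pvCanon, pvSub, pvEntry, ih]
    · simp [pvALoop, pvCanon, pvSub, hc, ih]

theorem pvReplaceGo_eq (fuel : Nat) :
    ∀ (l acc : List Char), l.length ≤ fuel →
      PySem.Chars.replace.go ['<'] [' '] fuel l acc = acc.reverse ++ l.map pvSub := by
  induction fuel with
  | zero =>
    intro l acc hl
    have : l = [] := List.eq_nil_of_length_eq_zero (by omega)
    subst this
    simp [PySem.Chars.replace.go]
  | succ n ih =>
    intro l acc hl
    cases l with
    | nil => simp [PySem.Chars.replace.go]
    | cons c t =>
      by_cases hc : c = '<'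
      · subst hc
        rw [PySem.Chars.replace.go]
        simp only [List.isPrefixOf, BEq.rfl, Bool.true_and, if_pos]
        rw [show List.drop (['<'] : List Char).length ('<' :: t) = t from rfl,
            show ([' '] : List Char).reverse ++ acc = ' ' :: acc from rfl,
            ih t (' ' :: acc) (by simpa using Nat.le_of_succ_le_succ hl)]
        simp [pvSub]
      · rw [PySem.Chars.replace.go]
        have : List.isPrefixOf ['<'] (c :: t) = false := by
          simp [List.isPrefixOf]
          exact fun hh => hc hh.symm
        rw [this]
        simp only [Bool.false_eq_true, if_neg, not_false_iff]
        rw [ih t (c :: acc) (by simpa using Nat.le_of_succ_le_succ hl)]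
        simp only [List.reverse_cons, List.map_cons, List.append_assoc, List.singleton_append, pvSub]
        rw [if_neg hc]

theorem pvReplace_eq (l : List Char) : PySem.Chars.replace l ['<'] [' '] = l.map pvSub := by
  unfold PySem.Chars.replace
  simp only [List.isEmpty_cons, if_neg, Bool.false_eq_true, not_false_iff]
  simpa using pvReplaceGo_eq l.length l [] (le_refl _)

theorem pvCanon_nil_of_not_mem (s : List Char) (offset : Int) :
    ∀ (l : List Char) (num : Nat), '<' ∉ l → pvCanon s offset l num = [] := by
  intro l
  induction l with
  | nil => intro num _; simp [pvCanon]
  | cons c r ih =>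
    intro num h
    have hc : c ≠ '<' := fun hc => h (hc ▸ List.mem_cons_self)
    simp [pvCanon, hc, ih (num + 1) (fun hm => h (List.mem_cons_of_mem _ hm))]

theorem pvCanon_append_of_not_mem (s : List Char) (offset : Int) :
    ∀ (xs ys : List Char) (num : Nat), '<' ∉ xs →
      pvCanon s offset (xs ++ ys) num = pvCanon s offset ys (num + xs.length) := by
  intro xs
  induction xs with
  | nil => intro ys num _; simp
  | cons c r ih =>
    intro ys num h
    have hc : c ≠ '<' := fun hc => h (hc ▸ List.mem_cons_self)
    simp only [List.cons_append, pvCanon, hc, List.length_cons]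
    rw [ih ys (num + 1) (fun hm => h (List.mem_cons_of_mem _ hm))]
    have e : num + 1 + r.length = num + (r.length + 1) := by omega
    rw [e]
    simp

theorem pvBHop_eq (s : List Char) (offset : Int) :
    ∀ (n i : Nat) (hi : i ≤ s.length), s.length - i ≤ n →
      pvBHop s offset i hi = pvCanon s offset (s.drop i) i := by
  intro n
  induction n with
  | zero =>
    intro i hi hn
    have hlen : s.length ≤ i := by omega
    have hdrop : s.drop i = [] := List.drop_eq_nil_of_le hlen
    rw [pvBHop]
    have hnone : PySem.Chars.findFrom s ['<'] (i : Int) none = -1 := by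
      rw [PySem.Chars.findFrom_natCast_eq_neg_one_iff s ['<'] i hi, hdrop]
      intro hinf
      have := List.eq_nil_of_infix_nil hinf
      simp at this
    rw [dif_pos hnone, hdrop, pvCanon]
  | succ n ih =>
    intro i hi hn
    rw [pvBHop]
    by_cases h : PySem.Chars.findFrom s ['<'] (i : Int) none = -1
    · rw [dif_pos h]
      rw [PySem.Chars.findFrom_natCast_eq_neg_one_iff s ['<'] i hi] at h
      have hmem : '<' ∉ s.drop i := by
        intro hm
        obtain ⟨u, v, huv⟩ := List.append_of_mem hm
        exact h ⟨u, v, by rw [huv]; simp⟩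
      rw [pvCanon_nil_of_not_mem s offset _ i hmem]
    · rw [dif_neg h]
      have hspec := PySem.Chars.findFrom_natCast_spec s ['<'] i hi h
      set j : Nat := (PySem.Chars.findFrom s ['<'] (i : Int) none).toNat with hj
      have hij : i ≤ j := by have := hspec.1; omega
      have hjlt : j < s.length := by
        have hpre := hspec.2.1
        by_contra hle
        rw [List.drop_eq_nil_of_le (by omega)] at hpre
        exact absurd (List.prefix_nil.mp hpre) (by simp)
      have hsj : s[j]'hjlt = '<' := by
        have hpre := hspec.2.1
        rw [List.drop_eq_getElem_cons hjlt] at hpre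
        exact ((List.cons_prefix_cons.mp hpre).1).symm
      -- decompose drop i into a '<'-free stretch and the suffix at j
      have hsplit : s.drop i = (s.drop i).take (j - i) ++ s.drop j := by
        conv_lhs => rw [← List.take_append_drop (j - i) (s.drop i)]
        rw [List.drop_drop]
        have e : i + (j - i) = j := by omega
        rw [e]
      have hfree : '<' ∉ (s.drop i).take (j - i) := by
        intro hm
        obtain ⟨idx, hidx, hgv⟩ := List.getElem_of_mem hm
        have hidx' : idx < j - i := lt_of_lt_of_le hidx (by simp [List.length_take])
        have hidlen : i + idx < s.length := by omega
        have hval : s[i + idx]'hidlen = '<' := by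
          rw [List.getElem_take] at hgv
          rw [← hgv]
          rw [List.getElem_drop]
        have hprefix : ['<'] <+: s.drop (i + idx) := by
          rw [List.drop_eq_getElem_cons hidlen, hval]
          exact ⟨_, rfl⟩
        exact hspec.2.2 (i + idx) (by omega) (by omega) hprefix
      have hrw : pvCanon s offset (s.drop i) i = pvEntry s offset j :: pvCanon s offset (s.drop (j + 1)) (j + 1) := by
        rw [hsplit, pvCanon_append_of_not_mem s offset _ _ i hfree]
        have hlen : i + ((s.drop i).take (j - i)).length = j := by
          simp [List.length_take, List.length_drop]
          omega
        rw [hlen, List.drop_eq_getElem_cons hjlt, hsj, pvCanon, if_pos rfl]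
      refine Eq.trans ?_ hrw.symm
      exact congrArg (List.cons (pvEntry s offset j)) (ih (j + 1) hjlt (by omega))

-- ===== VERDICT (by name: the statement is the Claim_ definition above) =====
theorem replace_less_than_with_positions_spec : Claim_equal_replace_less_than_with_positions := by
  intro string offset _
  unfold Spec_replace_less_than_with_positions
  unfold replace_less_than_with_positions replace_less_than_with_positions_alt
  rw [pvALoop_eq]
  refine Prod.ext ?_ ?_
  · show String.ofList ([] ++ string.toList.map pvSub) = PySem.Str.replace string "<" " "
    apply String.toList_inj.mp
    rw [PySem.Str.toList_replace]
    have h1 : ("<" : String).toList = ['<'] := by decide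
    have h2 : (" " : String).toList = [' '] := by decide
    rw [h1, h2, pvReplace_eq]
    simp
  · show [] ++ pvCanon string.toList offset string.toList 0 = pvBHop string.toList offset 0 (Nat.zero_le _)
    rw [pvBHop_eq string.toList offset string.toList.length 0 (Nat.zero_le _) (by omega)]
    simp
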